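-- pv_equiv track=rewrite | github.com/toxicbishop/ML-Internship | convert_to_notebooks.py | split_cells
-- ===== SOURCE A (Python) =====
-- def split_cells(src: str) -> list[str]:
--     """
--     Split a script into cells on blank-line boundaries between top-level blocks.
--     Keeps imports, each def, and the final if __name__ block as separate cells.
--     """
--     lines = src.splitlines(keepends=True)
--     cells, buf = [], []
--     i = 0
--     while i < len(lines):
--         line = lines[i]
--         # At start of a new top-level block (no indent, not blank, not a comment-only continuation)
--         stripped = line.lstrip()
--         is_top_level_start = (
--             line and not line.startswith((" ", "\t"))
--             and stripped and not stripped.startswith("#")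
--         )
--         # Flush buffer when we hit a new top-level def/class/if-main or the first import after non-import code
--         if is_top_level_start and buf and (
--             stripped.startswith(("def ", "class ", "if __name__"))
--         ):
--             cells.append("".join(buf).rstrip() + "\n")
--             buf = []
--         buf.append(line)
--         i += 1
--     if buf:
--         cells.append("".join(buf).rstrip() + "\n")
--     return cells
-- ===== SOURCE B (Python) =====
-- def _is_cut(line: str) -> bool:
--     s = line.lstrip()
--     return (not line.startswith((" ", "\t")) and bool(s)
--             and not s.startswith("#")
--             and s.startswith(("def ", "class ", "if __name__")))
--
--
-- def split_cells(src: str) -> list[str]: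
--     lines = src.splitlines(keepends=True)
--     groups: list[list[str]] = []
--     for line in reversed(lines):
--         if groups and not _is_cut(groups[0][0]):
--             groups[0] = [line] + groups[0]
--         else:
--             groups = [[line]] + groups
--     return ["".join(g).rstrip() + "\n" for g in groups]
-- ===== Notes on version B (the rewrite author's own statement) =====
-- stated objective: alternative
-- what changed: Replaces A's forward buffer-and-flush streaming loop with a single backward pass that builds the line groups back-to-front (each line joins the following group unless that group starts at a cut line), then maps join/rstrip over the groups.
import Mathlib
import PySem

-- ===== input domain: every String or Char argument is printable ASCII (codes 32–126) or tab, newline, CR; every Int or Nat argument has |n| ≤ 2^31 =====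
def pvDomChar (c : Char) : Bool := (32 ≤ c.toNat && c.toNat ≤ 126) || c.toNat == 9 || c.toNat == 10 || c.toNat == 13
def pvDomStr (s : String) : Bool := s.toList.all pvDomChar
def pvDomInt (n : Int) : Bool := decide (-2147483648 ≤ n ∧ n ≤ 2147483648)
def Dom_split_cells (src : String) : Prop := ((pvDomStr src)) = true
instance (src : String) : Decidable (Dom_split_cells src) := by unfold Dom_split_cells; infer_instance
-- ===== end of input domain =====

-- B groups the lines by a single backward pass (building the groups back-to-front) instead of A's
-- forward buffer-and-flush loop; objective: alternative decomposition, same cost.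

-- shared hand-port of str.splitlines(keepends=True): exact on the Dom alphabet, where the only
-- line boundaries are '\n', '\r' and '\r\n'
def pvSplitlinesKeep : List Char → List Char → List (List Char)
  | acc, [] => if acc.isEmpty then [] else [acc.reverse]
  | acc, '\r' :: '\n' :: rest => (acc.reverse ++ ['\r', '\n']) :: pvSplitlinesKeep [] rest
  | acc, '\r' :: rest => (acc.reverse ++ ['\r']) :: pvSplitlinesKeep [] rest
  | acc, '\n' :: rest => (acc.reverse ++ ['\n']) :: pvSplitlinesKeep [] rest
  | acc, c :: rest => pvSplitlinesKeep (c :: acc) rest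

-- shared port of the cell expression '"".join(buf).rstrip() + "\n"' (identical in both Pythons)
def pvCell (buf : List (List Char)) : String :=
  String.ofList (PySem.Chars.rstrip buf.flatten ++ ['\n'])

-- ===== PORT A =====
def splitCellsLoop : List (List Char) → List String → List (List Char) → List String
  | [], cells, buf => if buf.isEmpty then cells else cells ++ [pvCell buf]
  | line :: rest, cells, buf =>
      let stripped := PySem.Chars.lstrip line
      let isTop := !line.isEmpty && !PySem.Chars.startswith line [' '] &&
                   !PySem.Chars.startswith line ['\t'] && !stripped.isEmpty &&
                   !PySem.Chars.startswith stripped ['#']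
      if isTop && !buf.isEmpty &&
         (PySem.Chars.startswith stripped "def ".toList ||
          PySem.Chars.startswith stripped "class ".toList ||
          PySem.Chars.startswith stripped "if __name__".toList) then
        splitCellsLoop rest (cells ++ [pvCell buf]) [line]
      else
        splitCellsLoop rest cells (buf ++ [line])

def split_cells (src : String) : List String :=
  splitCellsLoop (pvSplitlinesKeep [] src.toList) [] []

-- ===== PORT B =====
def pvIsCut (line : List Char) : Bool :=
  let s := PySem.Chars.lstrip line
  !PySem.Chars.startswith line [' '] && !PySem.Chars.startswith line ['\t'] &&
  !s.isEmpty && !PySem.Chars.startswith s ['#'] &&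
  (PySem.Chars.startswith s "def ".toList || PySem.Chars.startswith s "class ".toList ||
   PySem.Chars.startswith s "if __name__".toList)

def pvConsGroup (line : List Char) (groups : List (List (List Char))) : List (List (List Char)) :=
  match groups with
  | g :: gs => if !pvIsCut (g.headD []) then ([line] ++ g) :: gs else [line] :: g :: gs
  | [] => [[line]]

def split_cells_alt (src : String) : List String :=
  let lines := pvSplitlinesKeep [] src.toList
  let groups := lines.reverse.foldl (fun gs line => pvConsGroup line gs) []
  groups.map pvCell

-- ===== PRECONDITION & SPEC =====
def Spec_split_cells (src : String) (out : List String) : Prop := out = split_cells_alt src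
instance (src : String) (out : List String) : Decidable (Spec_split_cells src out) := by unfold Spec_split_cells; infer_instance

-- ===== CLAIM (what is proved, stated in full; the proofs are below) =====
def Claim_equal_split_cells : Prop := ∀ (src : String), Dom_split_cells src → Spec_split_cells src (split_cells src)

-- ===== LEMMAS AND PROOFS =====

-- attaching a (nonempty) pending buffer to the groups of the remaining lines
def pvAbsorb (buf : List (List Char)) (gs : List (List (List Char))) : List (List (List Char)) :=
  match gs with
  | [] => [buf]
  | g :: gs' => if pvIsCut (g.headD []) then buf :: g :: gs' else (buf ++ g) :: gs'

lemma pvAbsorb_single (l : List Char) (G : List (List (List Char))) :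
    pvAbsorb [l] G = pvConsGroup l G := by
  cases G with
  | nil => rfl
  | cons g gs =>
      by_cases h : pvIsCut (g.head?.getD []) <;>
        simp [pvAbsorb, pvConsGroup, h]

-- A's flush condition, as a Bool, is exactly pvIsCut
lemma pvFlush_eq (line : List Char) :
    ((!line.isEmpty && !PySem.Chars.startswith line [' '] &&
      !PySem.Chars.startswith line ['\t'] && !(PySem.Chars.lstrip line).isEmpty &&
      !PySem.Chars.startswith (PySem.Chars.lstrip line) ['#']) &&
     (PySem.Chars.startswith (PySem.Chars.lstrip line) "def ".toList ||
      PySem.Chars.startswith (PySem.Chars.lstrip line) "class ".toList ||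
      PySem.Chars.startswith (PySem.Chars.lstrip line) "if __name__".toList))
    = pvIsCut line := by
  cases line with
  | nil => simp [pvIsCut, PySem.Chars.lstrip]
  | cons c cs => simp [pvIsCut, Bool.and_assoc]

lemma pvLoop_eq (rest : List (List Char)) :
    ∀ (cells : List String) (buf : List (List Char)), buf ≠ [] →
    splitCellsLoop rest cells buf
      = cells ++ (pvAbsorb buf (rest.foldr pvConsGroup [])).map pvCell := by
  induction rest with
  | nil =>
      intro cells buf hb
      simp [splitCellsLoop, pvAbsorb, hb]
  | cons l rest ih =>
      intro cells buf hb
      have hbe : (!buf.isEmpty) = true := by simp [hb]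
      rw [splitCellsLoop]
      simp only [hbe, Bool.and_true]
      rw [pvFlush_eq l, List.foldr_cons]
      by_cases hc : pvIsCut l
      · rw [if_pos hc, ih _ [l] (by simp), pvAbsorb_single]
        cases hG : rest.foldr pvConsGroup [] with
        | nil => simp [pvAbsorb, pvConsGroup, hc]
        | cons g gs =>
            by_cases h : pvIsCut (g.head?.getD []) <;>
              simp [pvAbsorb, pvConsGroup, hc, h]
      · rw [if_neg hc, ih _ (buf ++ [l]) (by simp)]
        cases hG : rest.foldr pvConsGroup [] with
        | nil => simp [pvAbsorb, pvConsGroup, hc]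
        | cons g gs =>
            by_cases h : pvIsCut (g.head?.getD []) <;>
              simp [pvAbsorb, pvConsGroup, hc, h]

lemma pvBoth_eq (lines : List (List Char)) :
    splitCellsLoop lines [] []
      = (lines.reverse.foldl (fun gs line => pvConsGroup line gs) []).map pvCell := by
  rw [List.foldl_reverse]
  cases lines with
  | nil => simp [splitCellsLoop]
  | cons l rest =>
      rw [splitCellsLoop]
      rw [if_neg (by simp)]
      rw [show ([] : List (List Char)) ++ [l] = [l] by simp]
      rw [pvLoop_eq rest [] [l] (by simp)]
      simp [pvAbsorb_single]

-- ===== VERDICT (by name: the statement is the Claim_ definition above) =====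
theorem split_cells_spec : Claim_equal_split_cells := by
  intro src _
  unfold Spec_split_cells split_cells split_cells_alt
  exact pvBoth_eq _
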